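-- pv_equiv track=rewrite | github.com/mindis/tdt4900-master-thesis | preprocess.py | collapse_session
-- ===== SOURCE A (Python) =====
-- def collapse_session(session):
--     new_session = [session[0]]
--     for i in range(1, len(session)):
--         last_event = new_session[-1]
--         current_event = session[i]
--         if current_event[1] != last_event[1]:
--             new_session.append(current_event)
--
--     return new_session
-- ===== SOURCE B (Python) =====
-- def collapse_session(session):
--     # Run-skipping grouping: emit the first event of each run of equal keys,
--     # then jump the index past the whole run with an inner scan.
--     n = len(session)
--     out = []
--     i = 0
--     while i < n:
--         out.append(session[i])
--         k = session[i][1]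
--         j = i + 1
--         while j < n and session[j][1] == k:
--             j += 1
--         i = j
--     return out
-- ===== Notes on version B (the rewrite author's own statement) =====
-- stated objective: alternative
-- what changed: Replaces A's seed-accumulator loop that compares each event with the last appended one by a run-skipping grouping: an outer loop emits the first event of each run and an inner loop advances the index past all events sharing its key, so the output list is never inspected.
import Mathlib
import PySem

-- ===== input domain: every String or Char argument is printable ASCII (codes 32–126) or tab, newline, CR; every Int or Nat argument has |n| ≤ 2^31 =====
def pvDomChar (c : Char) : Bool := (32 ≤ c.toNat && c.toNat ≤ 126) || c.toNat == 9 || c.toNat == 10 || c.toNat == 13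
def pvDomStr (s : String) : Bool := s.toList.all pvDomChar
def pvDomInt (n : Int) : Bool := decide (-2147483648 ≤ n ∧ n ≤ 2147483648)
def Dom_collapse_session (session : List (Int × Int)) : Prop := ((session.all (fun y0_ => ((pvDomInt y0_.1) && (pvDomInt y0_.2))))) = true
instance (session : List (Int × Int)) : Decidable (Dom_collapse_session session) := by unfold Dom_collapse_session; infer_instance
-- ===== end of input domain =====

-- B groups the session into runs of equal keys with a run-skipping index loop (emit the first
-- event of a run, skip past the run) instead of A's compare-with-last-appended accumulator loop;
-- on the empty list A raises IndexError (excluded by Pre_) while B returns [].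

-- ===== PORT A =====
-- new_session = [session[0]]; for i in range(1, len(session)): append session[i] if its key
-- differs from new_session[-1]'s.  session = [] (where session[0] raises) is outside Pre_.
def collapse_session (session : List (Int × Int)) : List (Int × Int) :=
  match session with
  | [] => []   -- session[0] raises IndexError here; excluded by Pre_collapse_session
  | e0 :: _ =>
    (PySem.List.pyRange 1 (session.length : Int) 1).foldl
      (fun ns i =>
        let last_event := PySem.List.pyGetD ns (-1) (0, 0)
        let current_event := PySem.List.pyGetD session i (0, 0)
        if current_event.2 ≠ last_event.2 then ns ++ [current_event] else ns)
      [e0]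

-- ===== PORT B =====
-- Inner while loop of Source B: 'j = i + 1; while j < n and session[j][1] == k: j += 1' — returns
-- the index just past the run of key k starting at j.
def pvSkip (session : List (Int × Int)) (k : Int) (j : Nat) : Nat :=
  if h : j < session.length then
    if (session[j]).2 = k then pvSkip session k (j + 1) else j
  else j
termination_by session.length - j
decreasing_by omega

-- needed by pvOuter's termination: the inner loop only moves the index forward
theorem pvSkip_ge_aux (session : List (Int × Int)) (k : Int) :
    ∀ (n j : Nat), session.length - j ≤ n → j ≤ pvSkip session k j := by
  intro n
  induction n with
  | zero =>
    intro j h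
    rw [pvSkip]
    have hj : ¬ j < session.length := by omega
    simp [hj]
  | succ n ih =>
    intro j h
    rw [pvSkip]
    split_ifs with h1 h2
    · have := ih (j + 1) (by omega); omega
    · exact le_refl j
    · exact le_refl j

theorem pvSkip_ge (session : List (Int × Int)) (k : Int) (j : Nat) : j ≤ pvSkip session k j :=
  pvSkip_ge_aux session k (session.length - j) j le_rfl

-- Outer while loop of Source B, the obvious structural recursion on the index: emit session[i],
-- continue from the index past its run (out.append becomes the cons of this emission).
def pvOuter (session : List (Int × Int)) (i : Nat) : List (Int × Int) :=
  if h : i < session.length then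
    session[i] :: pvOuter session (pvSkip session (session[i]).2 (i + 1))
  else []
termination_by session.length - i
decreasing_by
  have := pvSkip_ge session (session[i]).2 (i + 1)
  omega

def collapse_session_alt (session : List (Int × Int)) : List (Int × Int) :=
  pvOuter session 0

-- ===== PRECONDITION & SPEC =====
-- Pre_ excludes only the empty list, where A's session[0] raises IndexError.
def Pre_collapse_session (session : List (Int × Int)) : Prop := session ≠ []
instance (session : List (Int × Int)) : Decidable (Pre_collapse_session session) := by
  unfold Pre_collapse_session; infer_instance

def pvWitness_collapse_session : (List (Int × Int)) := [(1, 2), (3, 2), (4, 5)]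

def Spec_collapse_session (session : List (Int × Int)) (out : List (Int × Int)) : Prop :=
  out = collapse_session_alt session
instance (session : List (Int × Int)) (out : List (Int × Int)) : Decidable (Spec_collapse_session session out) := by
  unfold Spec_collapse_session; infer_instance

-- ===== CLAIM (what is proved, stated in full; the proofs are below) =====
def Claim_equal_collapse_session : Prop :=
  ∀ (session : List (Int × Int)), Dom_collapse_session session →
    Pre_collapse_session session → Spec_collapse_session session (collapse_session session)

-- ===== LEMMAS AND PROOFS =====

-- A's loop body, once the index has been resolved to the current event.
def pvStep (ns : List (Int × Int)) (cur : Int × Int) : List (Int × Int) :=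
  if cur.2 ≠ (PySem.List.pyGetD ns (-1) (0, 0)).2 then ns ++ [cur] else ns

-- The common reference: collapse the tail, given the key of the last emitted event.
def pvCol (k : Int) : List (Int × Int) → List (Int × Int)
  | [] => []
  | c :: rs => if c.2 = k then pvCol k rs else c :: pvCol c.2 rs

-- A's fold appends exactly pvCol of the last emitted key.
theorem pvFold_eq (rest : List (Int × Int)) :
    ∀ (acc : List (Int × Int)) (lastEl : Int × Int),
      rest.foldl pvStep (acc ++ [lastEl]) = (acc ++ [lastEl]) ++ pvCol lastEl.2 rest := by
  induction rest with
  | nil => intro acc lastEl; simp [pvCol]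
  | cons c rs ih =>
    intro acc lastEl
    have hlast : PySem.List.pyGetD (acc ++ [lastEl]) (-1) (0, 0) = lastEl :=
      PySem.List.pyGetD_neg_one_append_singleton acc lastEl (0, 0)
    by_cases hc : c.2 = lastEl.2
    · have hstep : pvStep (acc ++ [lastEl]) c = acc ++ [lastEl] := by
        simp [pvStep, hlast, hc]
      simp only [List.foldl_cons, hstep, ih acc lastEl]
      simp [pvCol, hc]
    · have hstep : pvStep (acc ++ [lastEl]) c = (acc ++ [lastEl]) ++ [c] := by
        simp [pvStep, hlast, hc]
      have := ih (acc ++ [lastEl]) c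
      simp only [List.foldl_cons, hstep]
      rw [List.append_assoc] at this ⊢
      rw [this]
      simp [pvCol, hc]

-- B's skip-then-continue from index j computes pvCol of the dropped suffix.
theorem pvSkipOuter (session : List (Int × Int)) :
    ∀ (n j : Nat) (k : Int), session.length - j ≤ n →
      pvOuter session (pvSkip session k j) = pvCol k (session.drop j) := by
  intro n
  induction n with
  | zero =>
    intro j k h
    have hj : ¬ j < session.length := by omega
    rw [pvSkip]
    simp only [hj, dite_false]
    rw [pvOuter]
    simp only [hj, dite_false]
    rw [List.drop_eq_nil_of_le (by omega)]
    rfl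
  | succ n ih =>
    intro j k h
    by_cases hj : j < session.length
    · have hdrop : session.drop j = session[j] :: session.drop (j + 1) :=
        List.drop_eq_getElem_cons hj
      by_cases hk : (session[j]).2 = k
      · rw [pvSkip]
        simp only [hj, dite_true, hk, if_true]
        rw [ih (j + 1) k (by omega), hdrop]
        simp [pvCol, hk]
      · rw [pvSkip]
        simp only [hj, dite_true, hk, if_false]
        rw [pvOuter]
        simp only [hj, dite_true]
        rw [ih (j + 1) (session[j]).2 (by omega), hdrop]
        simp [pvCol, hk]
    · rw [pvSkip]
      simp only [hj, dite_false]
      rw [pvOuter]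
      simp only [hj, dite_false]
      rw [List.drop_eq_nil_of_le (by omega)]
      rfl

theorem pvAlt_cons (x : Int × Int) (rest : List (Int × Int)) :
    collapse_session_alt (x :: rest) = x :: pvCol x.2 rest := by
  unfold collapse_session_alt
  rw [pvOuter]
  have h0 : 0 < (x :: rest).length := by simp
  simp only [h0, dite_true]
  have : (x :: rest)[0] = x := rfl
  rw [this, pvSkipOuter (x :: rest) ((x :: rest).length - 1) 1 x.2 (by simp)]
  simp

-- ===== VERDICT (by name: the statement is the Claim_ definition above) =====
theorem collapse_session_spec : Claim_equal_collapse_session := by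
  intro session _ hpre
  unfold Spec_collapse_session
  obtain ⟨x, rest, rfl⟩ : ∃ x rs, session = x :: rs := by
    cases session with
    | nil => exact absurd rfl hpre
    | cons a b => exact ⟨a, b, rfl⟩
  have hA : collapse_session (x :: rest) = rest.foldl pvStep [x] := by
    show (PySem.List.pyRange 1 ((x :: rest).length : Int) 1).foldl
        (fun ns i => pvStep ns (PySem.List.pyGetD (x :: rest) i (0, 0))) [x] =
      rest.foldl pvStep [x]
    rw [PySem.List.foldl_pyRange_pyGetD' (a := 1) (xs := x :: rest)
      (f := pvStep) (d := (0, 0)) (init := [x]) (by norm_num)]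
    simp
  rw [hA, pvAlt_cons]
  have := pvFold_eq rest [] x
  simpa using this
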